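-- pv_equiv track=rewrite | github.com/yustero/csb | claus_project/programs/nested_canalysing_first.py | steady_state_frequency
-- ===== SOURCE A (Python) =====
-- def steady_state_frequency(steadys,adj):
--
--     n=len(adj)
--     sf=[[],[]]
--     stn=len(steadys)
--     for i in range(0,stn):
--         if steadys[i] not in sf[0]:
--             sf[0].append(steadys[i])
--             sf[1].append(1)
--         elif steadys[i] in sf[0]:
--             m=sf[0].index(steadys[i])
--             sf[1][m]+=1
--     return(sf)
-- ===== SOURCE B (Python) =====
-- def steady_state_frequency(steadys, adj):
--     # Two-pass version: collect distinct states in first-seen order, then count each.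
--     distinct = []
--     for s in steadys:
--         if s not in distinct:
--             distinct.append(s)
--     counts = [steadys.count(d) for d in distinct]
--     return [distinct, counts]
-- ===== Notes on version B (the rewrite author's own statement) =====
-- stated objective: simpler
-- what changed: A interleaves distinct-collection and counting in one scan that keeps an index-aligned counter list updated via list.index; B splits the work into two plain passes: first collect the distinct states in first-seen order, then compute each count with steadys.count.
import Mathlib
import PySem

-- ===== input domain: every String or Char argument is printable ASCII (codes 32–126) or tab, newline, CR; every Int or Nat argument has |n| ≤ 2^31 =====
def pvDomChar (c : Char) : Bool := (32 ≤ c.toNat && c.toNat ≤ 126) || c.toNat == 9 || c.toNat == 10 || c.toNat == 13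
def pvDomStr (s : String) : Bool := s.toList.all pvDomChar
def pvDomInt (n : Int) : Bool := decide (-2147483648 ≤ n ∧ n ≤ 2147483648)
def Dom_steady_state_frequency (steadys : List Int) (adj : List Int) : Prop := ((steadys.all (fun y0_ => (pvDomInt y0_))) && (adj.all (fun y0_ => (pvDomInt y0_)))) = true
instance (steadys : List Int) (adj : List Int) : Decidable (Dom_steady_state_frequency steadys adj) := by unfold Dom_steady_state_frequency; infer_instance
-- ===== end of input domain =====

-- B replaces A's single scan-and-increment loop (counter list kept index-aligned via list.index)
-- by two plain passes: collect distinct states in first-seen order, then count each with steadys.count. Objective: simpler.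

-- ===== PORT A =====
-- one loop iteration of A: steadys[i] is looked at; 'not in' appends (x, 1), otherwise
-- m = sf[0].index(x) and sf[1][m] += 1 (read via pyGetD, write via pySetD; m is a valid index here)
def pvStepA (sf : List Int × List Int) (x : Int) : List Int × List Int :=
  if x ∉ sf.1 then
    (sf.1 ++ [x], sf.2 ++ [1])
  else if x ∈ sf.1 then
    match PySem.List.index? sf.1 x with
    | some m => (sf.1, PySem.List.pySetD sf.2 (m : Int) (PySem.List.pyGetD sf.2 (m : Int) 0 + 1))
    | none => sf
  else sf

def steady_state_frequency (steadys : List Int) (adj : List Int) : List (List Int) :=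
  let _n := adj.length
  let sf := steadys.foldl pvStepA ([], [])
  [sf.1, sf.2]

-- ===== PORT B =====
def steady_state_frequency_alt (steadys : List Int) (adj : List Int) : List (List Int) :=
  let distinct : List Int := steadys.foldl PySem.Set.add []   -- 'if s not in distinct: distinct.append(s)'
  let counts : List Int := distinct.map (fun d => (PySem.List.count steadys d : Int))
  [distinct, counts]

-- ===== PRECONDITION & SPEC =====
def Spec_steady_state_frequency (steadys : List Int) (adj : List Int) (out : List (List Int)) : Prop := out = steady_state_frequency_alt steadys adj
instance (steadys : List Int) (adj : List Int) (out : List (List Int)) : Decidable (Spec_steady_state_frequency steadys adj out) := by unfold Spec_steady_state_frequency; infer_instance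

-- ===== CLAIM (what is proved, stated in full; the proofs are below) =====
def Claim_equal_steady_state_frequency : Prop := ∀ (steadys : List Int) (adj : List Int), Dom_steady_state_frequency steadys adj → Spec_steady_state_frequency steadys adj (steady_state_frequency steadys adj)

-- ===== LEMMAS AND PROOFS =====

-- A's loop state after processing the prefix 'pre': the distinct elements of pre in
-- first-seen order, paired index-wise with their multiplicities in pre.
def pvState (pre : List Int) : List Int × List Int :=
  (PySem.Set.ofList pre, (PySem.Set.ofList pre).map (fun y => (List.count y pre : Int)))

-- setting / reading the slot at position p.length of 'p ++ b :: suf'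
lemma pvGetMid {α : Type} (p suf : List α) (b d : α) :
    (p ++ b :: suf).getD p.length d = b := by
  induction p with
  | nil => simp
  | cons a p ih => simp [ih]

lemma pvSetMid {α : Type} (p suf : List α) (b v : α) :
    (p ++ b :: suf).set p.length v = p ++ v :: suf := by
  induction p with
  | nil => simp
  | cons a p ih => simp [ih]

lemma pvStepA_state (pre : List Int) (x : Int) :
    pvStepA (pvState pre) x = pvState (pre ++ [x]) := by
  have hD : PySem.Set.ofList (pre ++ [x]) = PySem.Set.add (PySem.Set.ofList pre) x := by
    rw [PySem.Set.ofList_eq_foldl, PySem.Set.ofList_eq_foldl, List.foldl_append]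
    rfl
  have hcount : ∀ y : Int, y ≠ x → List.count y (pre ++ [x]) = List.count y pre := by
    intro y hy
    simp [List.count_append, List.count_nil, Ne.symm hy]
  by_cases hx : x ∈ pre
  · have hxD : x ∈ PySem.Set.ofList pre := (PySem.Set.mem_ofList pre x).mpr hx
    have hadd : PySem.Set.add (PySem.Set.ofList pre) x = PySem.Set.ofList pre := by
      simp [PySem.Set.add, PySem.Set.contains, hxD]
    obtain ⟨k, hk⟩ := Option.isSome_iff_exists.mp ((PySem.List.index?_isSome_iff _ _).mpr hxD)
    obtain ⟨p, suf, hsplit, hlen, hxp⟩ := (PySem.List.index?_eq_some_iff _ _ _).mp hk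
    have hnd : (p ++ x :: suf).Nodup := hsplit ▸ PySem.Set.nodup_ofList pre
    have hxs : x ∉ suf := by
      have h := hnd
      simp [List.nodup_append] at h
      tauto
    have hcx : List.count x (pre ++ [x]) = List.count x pre + 1 := by
      simp [List.count_append]
    unfold pvStepA pvState
    rw [hD, hadd]
    rw [if_neg (by simpa using hxD), if_pos hxD, hk]
    rw [hsplit]
    subst hlen
    refine Prod.ext rfl ?_
    simp only [List.map_append, List.map_cons]
    have hlm : p.length = (p.map (fun y => (List.count y pre : Int))).length := by simp
    rw [hlm, PySem.List.pyGetD_natCast, PySem.List.pySetD_natCast]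
    rw [pvGetMid, pvSetMid]
    have h1 : p.map (fun y => (List.count y pre : Int)) = p.map (fun y => (List.count y (pre ++ [x]) : Int)) := by
      apply List.map_congr_left
      intro a ha
      rw [hcount a (fun h => hxp (h ▸ ha))]
    have h2 : suf.map (fun y => (List.count y pre : Int)) = suf.map (fun y => (List.count y (pre ++ [x]) : Int)) := by
      apply List.map_congr_left
      intro a ha
      rw [hcount a (fun h => hxs (h ▸ ha))]
    rw [h1, h2, hcx]
    push_cast
    ring_nf
  · have hxD : x ∉ PySem.Set.ofList pre := fun h => hx ((PySem.Set.mem_ofList pre x).mp h)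
    have hadd : PySem.Set.add (PySem.Set.ofList pre) x = PySem.Set.ofList pre ++ [x] := by
      simp [PySem.Set.add, PySem.Set.contains, hxD]
    unfold pvStepA pvState
    rw [hD, hadd]
    rw [if_pos (by simpa using hxD)]
    refine Prod.ext rfl ?_
    simp only [List.map_append, List.map_cons, List.map_nil]
    have h1 : (PySem.Set.ofList pre).map (fun y => (List.count y pre : Int)) = (PySem.Set.ofList pre).map (fun y => (List.count y (pre ++ [x]) : Int)) := by
      apply List.map_congr_left
      intro a ha
      have hax : a ≠ x := fun h => hxD (h ▸ ha)
      rw [hcount a hax]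
    have h2 : List.count x (pre ++ [x]) = 1 := by
      simp [List.count_append, List.count_eq_zero.mpr hx]
    rw [h1, h2]
    norm_num

lemma pvFoldA_state : ∀ (l pre : List Int),
    l.foldl pvStepA (pvState pre) = pvState (pre ++ l) := by
  intro l
  induction l with
  | nil => intro pre; simp
  | cons x l ih =>
      intro pre
      rw [List.foldl_cons, pvStepA_state, ih (pre ++ [x])]
      simp

-- ===== VERDICT (by name: the statement is the Claim_ definition above) =====
theorem steady_state_frequency_spec : Claim_equal_steady_state_frequency := by
  intro steadys adj _
  unfold Spec_steady_state_frequency steady_state_frequency steady_state_frequency_alt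
  have h0 : (([], []) : List Int × List Int) = pvState [] := rfl
  rw [h0, pvFoldA_state steadys []]
  simp [pvState, ← PySem.Set.ofList_eq_foldl, PySem.List.count_eq]
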